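-- pv_equiv track=rewrite | github.com/ferocemarcello/bookinganalyzer | helper.py | cluster_raw_corpus_by_nation
-- ===== SOURCE A (Python) =====
-- def cluster_raw_corpus_by_nation(raw_corpus):
--     raw_corpus_by_nation={}
--     for r in raw_corpus:
--         if r[1]!='':
--             if r[1] not in raw_corpus_by_nation.keys():
--                 raw_corpus_by_nation[r[1]]=[]
--             raw_corpus_by_nation[r[1]].append(r)
--     return raw_corpus_by_nation
-- ===== SOURCE B (Python) =====
-- def cluster_raw_corpus_by_nation(raw_corpus):
--     # Two-pass decomposition: first collect the distinct non-empty nations in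
--     # first-appearance order, then build each group with a filtering pass.
--     nations = []
--     for r in raw_corpus:
--         if r[1] != '' and r[1] not in nations:
--             nations.append(r[1])
--     return {n: [r for r in raw_corpus if r[1] == n] for n in nations}
-- ===== Notes on version B (the rewrite author's own statement) =====
-- stated objective: alternative
-- what changed: Replaces A's single pass that incrementally grows per-nation lists in a dict with a two-pass scheme: one scan collecting the distinct nations in first-appearance order, then a dict comprehension that builds each group by filtering the corpus.
import Mathlib
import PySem

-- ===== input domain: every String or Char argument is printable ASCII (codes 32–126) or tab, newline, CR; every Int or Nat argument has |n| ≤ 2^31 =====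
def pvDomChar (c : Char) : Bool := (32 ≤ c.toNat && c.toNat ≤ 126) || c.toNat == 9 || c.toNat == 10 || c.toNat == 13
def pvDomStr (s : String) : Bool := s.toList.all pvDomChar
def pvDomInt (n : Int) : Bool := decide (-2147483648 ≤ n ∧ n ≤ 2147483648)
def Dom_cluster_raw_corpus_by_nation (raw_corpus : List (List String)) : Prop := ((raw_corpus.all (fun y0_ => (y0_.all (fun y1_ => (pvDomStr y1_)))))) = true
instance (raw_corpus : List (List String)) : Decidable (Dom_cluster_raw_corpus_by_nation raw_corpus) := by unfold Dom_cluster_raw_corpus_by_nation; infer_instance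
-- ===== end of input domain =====

-- ===== PORT A =====
-- B reorganises A's single grouping pass into two passes (nation collection, then one filter per nation); same result, alternative decomposition.
def cluster_raw_corpus_by_nation (raw_corpus : List (List String)) : List (String × List (List String)) :=
  (raw_corpus.foldl
    (fun d r =>
      -- r[1]: IndexError on rows shorter than 2 is excluded by Pre_; the getD default is never read inside Pre_
      let n := PySem.List.pyGetD r 1 ""
      if n ≠ "" then
        let d' := if d.contains n then d else d.insert n []   -- if r[1] not in keys(): d[r[1]] = []
        d'.modify n [] (fun v => v ++ [r])                     -- d[r[1]].append(r)
      else d)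
    PySem.Dict.empty).items

-- ===== PORT B =====
def cluster_raw_corpus_by_nation_alt (raw_corpus : List (List String)) : List (String × List (List String)) :=
  let nations := raw_corpus.foldl
    (fun ns r =>
      let n := PySem.List.pyGetD r 1 ""
      if n ≠ "" ∧ n ∉ ns then ns ++ [n] else ns) []
  nations.map (fun n => (n, raw_corpus.filter (fun r => PySem.List.pyGetD r 1 "" == n)))

-- ===== PRECONDITION & SPEC =====
-- Python A (and B) read r[1]: rows with fewer than 2 fields raise IndexError, so they are outside Pre_.
def Pre_cluster_raw_corpus_by_nation (raw_corpus : List (List String)) : Prop :=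
  ∀ r ∈ raw_corpus, 2 ≤ r.length
instance (raw_corpus : List (List String)) : Decidable (Pre_cluster_raw_corpus_by_nation raw_corpus) := by unfold Pre_cluster_raw_corpus_by_nation; infer_instance
def pvWitness_cluster_raw_corpus_by_nation : List (List String) :=
  [["a", "IT"], ["b", "FR"], ["c", "IT"], ["d", ""]]
def Spec_cluster_raw_corpus_by_nation (raw_corpus : List (List String)) (out : List (String × List (List String))) : Prop := out = cluster_raw_corpus_by_nation_alt raw_corpus
instance (raw_corpus : List (List String)) (out : List (String × List (List String))) : Decidable (Spec_cluster_raw_corpus_by_nation raw_corpus out) := by unfold Spec_cluster_raw_corpus_by_nation; infer_instance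

-- ===== CLAIM (what is proved, stated in full; the proofs are below) =====
def Claim_equal_cluster_raw_corpus_by_nation : Prop := ∀ (raw_corpus : List (List String)), Dom_cluster_raw_corpus_by_nation raw_corpus → Pre_cluster_raw_corpus_by_nation raw_corpus → Spec_cluster_raw_corpus_by_nation raw_corpus (cluster_raw_corpus_by_nation raw_corpus)

-- ===== LEMMAS AND PROOFS =====

-- A's loop body as a named step function (definitionally equal to the lambda in port A)
def pvStepA (d : PySem.Dict String (List (List String))) (r : List String) :
    PySem.Dict String (List (List String)) :=
  let n := PySem.List.pyGetD r 1 ""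
  if n ≠ "" then
    let d' := if d.contains n then d else d.insert n []
    d'.modify n [] (fun v => v ++ [r])
  else d

-- the distinct non-empty nations of xs not already in ks, in first-appearance order
def pvNats (xs : List (List String)) (ks : List String) : List String :=
  match xs with
  | [] => []
  | r :: xs =>
    let n := PySem.List.pyGetD r 1 ""
    if n ≠ "" ∧ n ∉ ks then n :: pvNats xs (ks ++ [n]) else pvNats xs ks

lemma pvNats_mem : ∀ (xs : List (List String)) (ks : List String) (m : String),
    m ∈ pvNats xs ks → m ∉ ks ∧ m ≠ "" := by
  intro xs
  induction xs with
  | nil => intro ks m h; simp [pvNats] at h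
  | cons r xs ih =>
    intro ks m h
    simp only [pvNats] at h
    split at h
    · rename_i hc
      rcases List.mem_cons.mp h with rfl | h
      · exact ⟨hc.2, hc.1⟩
      · have := ih _ _ h
        refine ⟨fun hm => this.1 (by simp [hm]), this.2⟩
    · exact ih _ _ h

lemma pvFoldB : ∀ (xs : List (List String)) (ns : List String),
    xs.foldl
      (fun ns r =>
        let n := PySem.List.pyGetD r 1 ""
        if n ≠ "" ∧ n ∉ ns then ns ++ [n] else ns) ns
    = ns ++ pvNats xs ns := by
  intro xs
  induction xs with
  | nil => intro ns; simp [pvNats]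
  | cons r xs ih =>
    intro ns
    simp only [List.foldl_cons, pvNats]
    split
    · rw [ih]; simp
    · rw [ih]

lemma pvContains_iff (d : PySem.Dict String (List (List String))) (n : String) :
    d.contains n = true ↔ n ∈ d.items.map Prod.fst := by
  simp [PySem.Dict.contains, List.any_eq_true]

lemma pvFoldA : ∀ (xs : List (List String)) (d : PySem.Dict String (List (List String))),
    (d.items.map Prod.fst).Nodup → "" ∉ d.items.map Prod.fst →
    (xs.foldl pvStepA d).items
    = d.items.map (fun p => (p.1, p.2 ++ xs.filter (fun r => PySem.List.pyGetD r 1 "" == p.1)))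
      ++ (pvNats xs (d.items.map Prod.fst)).map
          (fun n => (n, xs.filter (fun r => PySem.List.pyGetD r 1 "" == n))) := by
  intro xs
  induction xs with
  | nil => intro d _ _; simp [pvNats]
  | cons r xs ih =>
    intro d hnd hne
    simp only [List.foldl_cons]
    by_cases hn : PySem.List.pyGetD r 1 "" = ""
    · -- empty nation: row is skipped by A and matched by no group key
      have hstep : pvStepA d r = d := by simp [pvStepA, hn]
      rw [hstep, ih d hnd hne]
      have hnats : pvNats (r :: xs) (d.items.map Prod.fst)
          = pvNats xs (d.items.map Prod.fst) := by
        simp only [pvNats]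
        rw [if_neg (by simp [hn])]
      rw [hnats]
      congr 1
      · apply List.map_congr_left; intro p hp
        have hp1 : p.1 ≠ "" := fun h => hne (h ▸ List.mem_map_of_mem hp)
        rw [List.filter_cons, if_neg (by simp [hn, Ne.symm hp1])]
      · apply List.map_congr_left; intro m hm
        have hm' := pvNats_mem xs _ m hm
        rw [List.filter_cons, if_neg (by simp [hn, Ne.symm hm'.2])]
    · by_cases hc : d.contains (PySem.List.pyGetD r 1 "") = true
      · -- existing nation: the row joins its group in place, keys unchanged
        have hmem : PySem.List.pyGetD r 1 "" ∈ d.items.map Prod.fst :=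
          (pvContains_iff d _).mp hc
        have hstep : (pvStepA d r).items
            = d.items.map (fun p =>
                if p.1 = PySem.List.pyGetD r 1 "" then (p.1, p.2 ++ [r]) else p) := by
          simp only [pvStepA, if_pos hn, if_pos hc, PySem.Dict.modify]
          rw [PySem.Dict.items_insert_of_contains d _ hc]
          apply List.map_congr_left; intro p hp
          by_cases h1 : p.1 = PySem.List.pyGetD r 1 ""
          · have hget : d.getD (PySem.List.pyGetD r 1 "") [] = p.2 := by
              have hmem2 : (p.1, p.2) ∈ d.items := by simpa using hp
              exact PySem.Dict.getD_of_mem_items d (h1 ▸ hmem2) hnd []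
            simp [h1, hget]
          · simp [h1]
        have hkeys : (pvStepA d r).items.map Prod.fst = d.items.map Prod.fst := by
          rw [hstep, List.map_map]
          apply List.map_congr_left; intro p _
          by_cases h1 : p.1 = PySem.List.pyGetD r 1 "" <;> simp [h1]
        have hnats : pvNats (r :: xs) (d.items.map Prod.fst)
            = pvNats xs (d.items.map Prod.fst) := by
          simp only [pvNats]
          rw [if_neg (by simp [hmem])]
        rw [ih (pvStepA d r) (hkeys ▸ hnd) (hkeys ▸ hne), hkeys, hstep, List.map_map, hnats]
        congr 1
        · apply List.map_congr_left; intro p hp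
          by_cases h1 : p.1 = PySem.List.pyGetD r 1 ""
          · simp only [Function.comp, h1]
            rw [List.filter_cons, if_pos (by simp)]
            simp [List.append_assoc]
          · simp only [Function.comp, if_neg h1]
            rw [List.filter_cons, if_neg (by simp [Ne.symm h1])]
        · apply List.map_congr_left; intro m hm
          have hm' := pvNats_mem xs _ m hm
          have hne' : PySem.List.pyGetD r 1 "" ≠ m := fun h => hm'.1 (h ▸ hmem)
          rw [List.filter_cons, if_neg (by simp [hne'])]
      · -- new nation: a fresh singleton group is appended at the end
        have hnmem : PySem.List.pyGetD r 1 "" ∉ d.items.map Prod.fst := by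
          intro h; exact hc ((pvContains_iff d _).mpr h)
        have hc' : d.contains (PySem.List.pyGetD r 1 "") = false := by
          simpa using hc
        have hstep : (pvStepA d r).items = d.items ++ [(PySem.List.pyGetD r 1 "", [r])] := by
          have h1 : (d.insert (PySem.List.pyGetD r 1 "") []).items
              = d.items ++ [(PySem.List.pyGetD r 1 "", [])] :=
            PySem.Dict.items_insert_of_not_contains d [] hc'
          have hcont : (d.insert (PySem.List.pyGetD r 1 "") []).contains
              (PySem.List.pyGetD r 1 "") = true :=
            PySem.Dict.contains_insert_self d _ []
          have hget : (d.insert (PySem.List.pyGetD r 1 "") []).getD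
              (PySem.List.pyGetD r 1 "") [] = [] :=
            PySem.Dict.getD_insert_self d _ [] []
          simp only [pvStepA, if_pos hn, hc', Bool.false_eq_true, if_false, PySem.Dict.modify]
          rw [PySem.Dict.items_insert_of_contains _ _ hcont, hget, h1, List.map_append]
          have h3 : ∀ p ∈ d.items,
              (if (p.1 == PySem.List.pyGetD r 1 "") = true
                then (PySem.List.pyGetD r 1 "", [] ++ [r]) else p) = id p := by
            intro p hp
            have hp1 : p.1 ≠ PySem.List.pyGetD r 1 "" :=
              fun h => hnmem (h ▸ List.mem_map_of_mem hp)
            simp [hp1]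
          rw [List.map_congr_left h3, List.map_id]
          simp
        have hkeys : (pvStepA d r).items.map Prod.fst
            = d.items.map Prod.fst ++ [PySem.List.pyGetD r 1 ""] := by
          rw [hstep]; simp
        have hnd2 : ((pvStepA d r).items.map Prod.fst).Nodup := by
          rw [hkeys]
          refine List.Nodup.append hnd (List.nodup_singleton _) ?_
          intro a ha hb
          rw [List.mem_singleton] at hb
          exact hnmem (hb ▸ ha)
        have hne2 : "" ∉ (pvStepA d r).items.map Prod.fst := by
          rw [hkeys]; simp [hne, Ne.symm hn]
        rw [ih (pvStepA d r) hnd2 hne2, hkeys, hstep]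
        simp only [pvNats]
        rw [if_pos ⟨hn, hnmem⟩, List.map_append, List.map_cons, List.append_assoc]
        congr 1
        · apply List.map_congr_left; intro p hp
          have hp1 : p.1 ≠ PySem.List.pyGetD r 1 "" :=
            fun h => hnmem (h ▸ List.mem_map_of_mem hp)
          rw [List.filter_cons, if_neg (by simp [Ne.symm hp1])]
        · have hhead : List.filter
              (fun r' => PySem.List.pyGetD r' 1 "" == PySem.List.pyGetD r 1 "") (r :: xs)
              = r :: List.filter
                  (fun r' => PySem.List.pyGetD r' 1 "" == PySem.List.pyGetD r 1 "") xs := by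
            rw [List.filter_cons, if_pos (by simp)]
          simp only [List.map_cons, List.map_nil, List.nil_append, List.cons_append, hhead]
          congr 1
          apply List.map_congr_left; intro m hm
          have hm' := pvNats_mem xs _ m hm
          have hne' : PySem.List.pyGetD r 1 "" ≠ m := fun h => hm'.1 (by simp [h])
          rw [List.filter_cons, if_neg (by simp [hne'])]

-- ===== VERDICT (by name: the statement is the Claim_ definition above) =====
theorem cluster_raw_corpus_by_nation_spec : Claim_equal_cluster_raw_corpus_by_nation := by
  intro raw_corpus _ _
  unfold Spec_cluster_raw_corpus_by_nation
  have hA : cluster_raw_corpus_by_nation raw_corpus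
      = (raw_corpus.foldl pvStepA PySem.Dict.empty).items := rfl
  rw [hA, pvFoldA raw_corpus PySem.Dict.empty (by simp [PySem.Dict.empty]) (by simp [PySem.Dict.empty])]
  unfold cluster_raw_corpus_by_nation_alt
  rw [pvFoldB]
  simp [PySem.Dict.empty]
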